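-- pv_equiv track=rewrite | github.com/ksaubhri12/ds_algo | practice_450/array/09_min_number_of_jump.py | index_of_max_element
-- ===== SOURCE A (Python) =====
-- def index_of_max_element(arr: [], start: int, end: int):
--     max_element_index = start
--     max_element = arr[start]
--     for i in range(start, end + 1):
--         element = arr[i] + i
--         max_element = max(max_element, element)
--         if element == max_element:
--             max_element_index = i
--
--     return max_element_index
-- ===== SOURCE B (Python) =====
-- def index_of_max_element(arr: [], start: int, end: int):
--     # pass 1: compute the best value (seeded with arr[start], as the task's init)
--     best = arr[start]
--     for i in range(start, end + 1):
--         best = max(best, arr[i] + i)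
--     # pass 2: locate the last index attaining it
--     result = start
--     for i in range(start, end + 1):
--         if arr[i] + i == best:
--             result = i
--     return result
-- ===== Notes on version B (the rewrite author's own statement) =====
-- stated objective: alternative
-- what changed: Replaces A's single fused pass (running max plus conditional index update) by two separate passes: first compute the maximum of arr[i]+i seeded with arr[start], then a second scan returning the last index attaining that maximum.
import Mathlib
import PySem

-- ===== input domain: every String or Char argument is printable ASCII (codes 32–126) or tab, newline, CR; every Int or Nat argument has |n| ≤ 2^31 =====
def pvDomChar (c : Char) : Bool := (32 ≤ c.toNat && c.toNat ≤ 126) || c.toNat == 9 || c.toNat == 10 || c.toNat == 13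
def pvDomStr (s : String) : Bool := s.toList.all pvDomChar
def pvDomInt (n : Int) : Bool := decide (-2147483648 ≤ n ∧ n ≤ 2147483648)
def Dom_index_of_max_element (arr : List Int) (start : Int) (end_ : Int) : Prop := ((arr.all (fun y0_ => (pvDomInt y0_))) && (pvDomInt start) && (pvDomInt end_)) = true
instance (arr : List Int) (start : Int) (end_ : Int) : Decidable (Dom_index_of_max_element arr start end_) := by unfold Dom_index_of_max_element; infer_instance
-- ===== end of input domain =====

-- B replaces A's single fused pass by two passes: compute the max of arr[i]+i (seeded with arr[start]),
-- then scan again for the last index attaining it. Alternative decomposition, same cost.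

-- ===== PORT A =====
-- literal port of A: one pass keeping (max_element_index, max_element)
def index_of_max_element (arr : List Int) (start : Int) (end_ : Int) : Int :=
  let s := (PySem.List.pyRange start (end_ + 1) 1).foldl
    (fun (st : Int × Int) i =>
      let element := PySem.List.pyGetD arr i 0 + i
      let max_element := max st.2 element
      (if element == max_element then i else st.1, max_element))
    (start, PySem.List.pyGetD arr start 0)
  s.1

-- ===== PORT B =====
-- literal port of B: pass 1 computes best, pass 2 keeps the last index attaining it
def index_of_max_element_alt (arr : List Int) (start : Int) (end_ : Int) : Int :=
  let best := (PySem.List.pyRange start (end_ + 1) 1).foldl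
    (fun b i => max b (PySem.List.pyGetD arr i 0 + i)) (PySem.List.pyGetD arr start 0)
  (PySem.List.pyRange start (end_ + 1) 1).foldl
    (fun r i => if PySem.List.pyGetD arr i 0 + i == best then i else r) start

-- ===== PRECONDITION & SPEC =====
-- Pre_: exactly the inputs where Python A returns (arr[start] and every arr[i], start ≤ i ≤ end, in range)
def Pre_index_of_max_element (arr : List Int) (start : Int) (end_ : Int) : Prop :=
  PySem.Raise.InRange arr.length start ∧ (start ≤ end_ → PySem.Raise.InRange arr.length end_)
instance (arr : List Int) (start : Int) (end_ : Int) : Decidable (Pre_index_of_max_element arr start end_) := by unfold Pre_index_of_max_element; infer_instance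
def pvWitness_index_of_max_element : List Int × Int × Int := ([3, 1, 4, 1], 0, 3)

def Spec_index_of_max_element (arr : List Int) (start : Int) (end_ : Int) (out : Int) : Prop := out = index_of_max_element_alt arr start end_
instance (arr : List Int) (start : Int) (end_ : Int) (out : Int) : Decidable (Spec_index_of_max_element arr start end_ out) := by unfold Spec_index_of_max_element; infer_instance

-- ===== CLAIM (what is proved, stated in full; the proofs are below) =====
def Claim_equal_index_of_max_element : Prop := ∀ (arr : List Int) (start : Int) (end_ : Int), Dom_index_of_max_element arr start end_ → Pre_index_of_max_element arr start end_ → Spec_index_of_max_element arr start end_ (index_of_max_element arr start end_)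

-- ===== LEMMAS AND PROOFS =====

-- the running max (snd of A's state) equals B's pass-1 fold
lemma snd_fused_eq_max_fold (f : Int → Int) (l : List Int) (r0 b0 : Int) :
    (l.foldl (fun (st : Int × Int) i =>
        let e := f i
        let m := max st.2 e
        (if e == m then i else st.1, m)) (r0, b0)).2
      = l.foldl (fun b i => max b (f i)) b0 := by
  induction l generalizing r0 b0 with
  | nil => rfl
  | cons x xs ih => simpa using ih _ _

-- core: the fused pass equals max-then-last-locate, by reverse induction on the index list
lemma fused_eq_two_pass (f : Int → Int) (l : List Int) (r0 b0 : Int) :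
    (l.foldl (fun (st : Int × Int) i =>
        let e := f i
        let m := max st.2 e
        (if e == m then i else st.1, m)) (r0, b0)).1
      = l.foldl (fun r i => if f i == l.foldl (fun b j => max b (f j)) b0 then i else r) r0 := by
  induction l using List.reverseRecOn with
  | nil => rfl
  | append_singleton xs x ih =>
      have hsnd := snd_fused_eq_max_fold f xs r0 b0
      by_cases h : xs.foldl (fun b j => max b (f j)) b0 ≤ f x
      · have hmax : max (xs.foldl (fun b j => max b (f j)) b0) (f x) = f x := max_eq_right h
        simp only [List.foldl_append, List.foldl_cons, List.foldl_nil, hsnd, hmax,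
          beq_self_eq_true, if_true]
      · have hmax : max (xs.foldl (fun b j => max b (f j)) b0) (f x)
            = xs.foldl (fun b j => max b (f j)) b0 := max_eq_left (le_of_not_ge h)
        have hne : (f x == xs.foldl (fun b j => max b (f j)) b0) = false := by
          simp only [beq_eq_false_iff_ne, ne_eq]; omega
        simp only [List.foldl_append, List.foldl_cons, List.foldl_nil, hsnd, hmax,
          hne, if_false, Bool.false_eq_true]
        exact ih

-- ===== VERDICT (by name: the statement is the Claim_ definition above) =====
theorem index_of_max_element_spec : Claim_equal_index_of_max_element := by
  intro arr start end_ _ _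
  unfold Spec_index_of_max_element index_of_max_element index_of_max_element_alt
  simpa using fused_eq_two_pass (fun i => PySem.List.pyGetD arr i 0 + i)
    (PySem.List.pyRange start (end_ + 1) 1) start (PySem.List.pyGetD arr start 0)
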